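-- pv_equiv track=rewrite | github.com/jnizam/Digital-Image-Processing | assignment 2/region_analysis/shape_counting.py | count_shapes
-- ===== SOURCE A (Python) =====
-- def count_shapes(shapes_data):
--     """Compute the count of shapes using the shapes data returned from identify shapes function
--        takes as input
--        shapes_data: a list/dict of regions, with centroid, shape, and area for each shape
--        returns: a dictionary with count of each shape
--        Example return value: {'circles': 21, 'ellipses': 25, 'rectangles': 31, 'squares': 23}
--        """
--
--     counts = {}
--     square = 0
--     rectangle = 0
--     circle = 0
--     ellipse = 0
--
--     for keys,value in list(shapes_data.items()):
--         Myshape = value['shape']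
--
--         if Myshape == 'c':
--             circle += 1
--         elif Myshape == 's':
--             square += 1
--         elif Myshape == 'e':
--             ellipse += 1
--         else:
--             rectangle += 1
--
--     counts['circles'] = circle
--     counts['ellipses'] = ellipse
--     counts['rectangles'] = rectangle
--     counts['squares'] = square
--
--     return counts
-- ===== SOURCE B (Python) =====
-- def count_shapes(shapes_data):
--     """Same counts as A: extract the shape codes once, then derive the four
--     totals with list.count, computing rectangles as the remainder."""
--     codes = [value['shape'] for value in shapes_data.values()]
--     circles = codes.count('c')
--     squares = codes.count('s')
--     ellipses = codes.count('e')
--     return {'circles': circles,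
--             'ellipses': ellipses,
--             'rectangles': len(codes) - circles - squares - ellipses,
--             'squares': squares}
-- ===== Notes on version B (the rewrite author's own statement) =====
-- stated objective: simpler
-- what changed: B extracts the list of shape codes once and derives circles/squares/ellipses with list.count, computing rectangles as len minus the other three, instead of A's single loop carrying four accumulators through an if/elif/else chain.
import Mathlib
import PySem

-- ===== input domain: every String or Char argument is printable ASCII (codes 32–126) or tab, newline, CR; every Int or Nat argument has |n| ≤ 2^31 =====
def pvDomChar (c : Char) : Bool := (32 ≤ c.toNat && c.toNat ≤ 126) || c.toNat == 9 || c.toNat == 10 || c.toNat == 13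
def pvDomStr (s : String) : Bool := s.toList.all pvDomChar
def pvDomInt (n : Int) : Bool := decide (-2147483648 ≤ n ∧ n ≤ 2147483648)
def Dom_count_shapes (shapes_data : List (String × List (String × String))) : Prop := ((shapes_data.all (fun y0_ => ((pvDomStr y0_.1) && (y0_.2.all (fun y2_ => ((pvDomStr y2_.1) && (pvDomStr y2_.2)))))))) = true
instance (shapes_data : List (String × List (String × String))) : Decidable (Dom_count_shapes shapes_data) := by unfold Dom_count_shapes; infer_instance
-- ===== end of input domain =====

-- One honest line: B derives the four counts from a single extracted code list (three
-- list.count passes plus a subtraction for rectangles) instead of A's accumulator loop;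
-- objective: simpler, same asymptotic cost.

-- Both Pythons receive a dict of dicts; the assoc-list argument is marshalled into
-- PySem.Dict once (shared input marshalling, not part of either algorithm).
def pvToDict (shapes_data : List (String × List (String × String))) :
    PySem.Dict String (PySem.Dict String String) :=
  PySem.Dict.ofList (shapes_data.map (fun p => (p.1, PySem.Dict.ofList p.2)))

-- ===== PORT A =====
-- the for-loop over shapes_data.items() with the four accumulators; none = KeyError on value['shape']
def countsLoop : List (String × PySem.Dict String String) → Int × Int × Int × Int →
    Option (Int × Int × Int × Int)
  | [], st => some st
  | (_, v) :: rest, (c, s, e, r) =>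
    match v.get? "shape" with
    | none => none
    | some sh =>
      countsLoop rest
        (if sh = "c" then (c + 1, s, e, r)
         else if sh = "s" then (c, s + 1, e, r)
         else if sh = "e" then (c, s, e + 1, r)
         else (c, s, e, r + 1))

def count_shapes (shapes_data : List (String × List (String × String))) : List (String × Int) :=
  match countsLoop (pvToDict shapes_data).items (0, 0, 0, 0) with
  | none => []   -- unreachable under Pre_count_shapes (KeyError in Python)
  | some (c, s, e, r) =>
    [("circles", c), ("ellipses", e), ("rectangles", r), ("squares", s)]

-- ===== PORT B =====
-- the comprehension [value['shape'] for value in shapes_data.values()]; none = KeyError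
def codesOf : List (PySem.Dict String String) → Option (List String)
  | [] => some []
  | v :: rest =>
    match v.get? "shape" with
    | none => none
    | some sh => (codesOf rest).map (sh :: ·)

def count_shapes_alt (shapes_data : List (String × List (String × String))) : List (String × Int) :=
  match codesOf (pvToDict shapes_data).values with
  | none => []   -- unreachable under Pre_count_shapes (KeyError in Python)
  | some codes =>
    let circles : Int := codes.count "c"
    let squares : Int := codes.count "s"
    let ellipses : Int := codes.count "e"
    [("circles", circles), ("ellipses", ellipses),
     ("rectangles", (codes.length : Int) - circles - squares - ellipses),
     ("squares", squares)]

-- ===== PRECONDITION & SPEC =====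
-- Pre_ excludes exactly the inputs where some region dict lacks the key "shape",
-- on which the Python A raises KeyError.
def Pre_count_shapes (shapes_data : List (String × List (String × String))) : Prop :=
  (shapes_data.all (fun p => p.2.any (fun q => q.1 == "shape"))) = true
instance (shapes_data : List (String × List (String × String))) : Decidable (Pre_count_shapes shapes_data) := by unfold Pre_count_shapes; infer_instance

def pvWitness_count_shapes : (List (String × List (String × String))) :=
  [("r1", [("shape", "c"), ("area", "4")]), ("r2", [("shape", "x")])]

def Spec_count_shapes (shapes_data : List (String × List (String × String))) (out : List (String × Int)) : Prop := out = count_shapes_alt shapes_data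
instance (shapes_data : List (String × List (String × String))) (out : List (String × Int)) : Decidable (Spec_count_shapes shapes_data out) := by unfold Spec_count_shapes; infer_instance

-- ===== CLAIM (what is proved, stated in full; the proofs are below) =====
def Claim_equal_count_shapes : Prop := ∀ (shapes_data : List (String × List (String × String))), Dom_count_shapes shapes_data → Pre_count_shapes shapes_data → Spec_count_shapes shapes_data (count_shapes shapes_data)

-- ===== LEMMAS AND PROOFS =====

-- a key listed in the pairs is found in the built dict
lemma get?_ofList_isSome {κ ν : Type} [BEq κ] [LawfulBEq κ] (l : List (κ × ν)) (k : κ)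
    (h : l.any (fun q => q.1 == k)) : ((PySem.Dict.ofList l).get? k).isSome := by
  rw [← PySem.Dict.contains_eq_isSome_get?, PySem.Dict.contains_iff_mem_keys]
  have hk : (PySem.Dict.ofList l).keys = PySem.Set.ofList (l.map Prod.fst) := by
    have := PySem.Dict.keys_foldl_insert_key l Prod.fst
      (fun d x => x.2) PySem.Dict.empty
    simpa [PySem.Dict.ofList, PySem.Dict.update, PySem.Dict.keys_empty,
      PySem.Set.update_nil_left] using this
  rw [hk, PySem.Set.mem_ofList]
  simp only [List.any_eq_true, beq_iff_eq] at h
  obtain ⟨q, hq, rfl⟩ := h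
  exact List.mem_map_of_mem hq

lemma foldl_insert_values {κ ν : Type} [BEq κ] [LawfulBEq κ] (l : List (κ × ν)) (w : ν) :
    ∀ (d : PySem.Dict κ ν),
      w ∈ (l.foldl (fun acc p => acc.insert p.1 p.2) d).values →
      w ∈ d.values ∨ ∃ p ∈ l, w = p.2 := by
  induction l with
  | nil => intro d hd; exact Or.inl hd
  | cons p rest ih =>
    intro d hd
    rcases ih (d.insert p.1 p.2) hd with h' | h'
    · rcases PySem.Dict.mem_values_insert d p.1 p.2 w h' with rfl | h''
      · exact Or.inr ⟨p, List.mem_cons_self .., rfl⟩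
      · exact Or.inl h''
    · obtain ⟨q, hq, rfl⟩ := h'
      exact Or.inr ⟨q, List.mem_cons_of_mem _ hq, rfl⟩

lemma values_ofList_sub {κ ν : Type} [BEq κ] [LawfulBEq κ] (l : List (κ × ν)) (w : ν)
    (h : w ∈ (PySem.Dict.ofList l).values) : ∃ p ∈ l, w = p.2 := by
  rcases foldl_insert_values l w PySem.Dict.empty
    (by simpa [PySem.Dict.ofList, PySem.Dict.update] using h) with h' | h'
  · simp [PySem.Dict.values, PySem.Dict.empty] at h'
  · exact h'

-- the accumulator loop computes exactly B's three counts plus the remainder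
lemma countsLoop_eq (l : List (String × PySem.Dict String String)) :
    ∀ (c s e r : Int),
    (∀ v ∈ l.map Prod.snd, ((v.get? "shape").isSome : Prop)) →
    ∃ codes, codesOf (l.map Prod.snd) = some codes ∧
      countsLoop l (c, s, e, r) =
        some (c + codes.count "c", s + codes.count "s", e + codes.count "e",
              r + ((codes.length : Int) - codes.count "c" - codes.count "s" - codes.count "e")) := by
  induction l with
  | nil => intro c s e r _; exact ⟨[], rfl, by simp [countsLoop]⟩
  | cons p rest ih =>
    intro c s e r h
    have hp : ((p.2.get? "shape").isSome : Prop) := h p.2 (by simp)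
    obtain ⟨sh, hsh⟩ := Option.isSome_iff_exists.mp hp
    have hrest : ∀ v ∈ rest.map Prod.snd, ((v.get? "shape").isSome : Prop) := by
      intro v hv; exact h v (by simp at hv ⊢; exact Or.inr hv)
    obtain ⟨codes, hcodes, _⟩ := ih c s e r hrest
    refine ⟨sh :: codes, ?_, ?_⟩
    · simp [codesOf, hsh, hcodes]
    · have step : countsLoop (p :: rest) (c, s, e, r) =
        countsLoop rest
          (if sh = "c" then (c + 1, s, e, r)
           else if sh = "s" then (c, s + 1, e, r)
           else if sh = "e" then (c, s, e + 1, r)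
           else (c, s, e, r + 1)) := by
        obtain ⟨k, v⟩ := p
        simp only [countsLoop, hsh]
      rw [step]
      by_cases hc : sh = "c"
      · subst hc
        obtain ⟨cs, hcs, hl⟩ := ih (c + 1) s e r hrest
        rw [hcodes] at hcs; injection hcs with hcs; subst hcs
        rw [if_pos rfl, hl]
        congr 1
        simp [Prod.ext_iff]
        omega
      · rw [if_neg hc]
        by_cases hs : sh = "s"
        · subst hs
          obtain ⟨cs, hcs, hl⟩ := ih c (s + 1) e r hrest
          rw [hcodes] at hcs; injection hcs with hcs; subst hcs
          rw [if_pos rfl, hl]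
          congr 1
          simp [Prod.ext_iff]
          omega
        · rw [if_neg hs]
          by_cases he : sh = "e"
          · subst he
            obtain ⟨cs, hcs, hl⟩ := ih c s (e + 1) r hrest
            rw [hcodes] at hcs; injection hcs with hcs; subst hcs
            rw [if_pos rfl, hl]
            congr 1
            simp [Prod.ext_iff]
            omega
          · rw [if_neg he]
            obtain ⟨cs, hcs, hl⟩ := ih c s e (r + 1) hrest
            rw [hcodes] at hcs; injection hcs with hcs; subst hcs
            rw [hl]
            congr 1
            simp [Prod.ext_iff, hc, hs, he]
            omega

lemma values_eq_map_snd_items {κ ν : Type} [BEq κ] (d : PySem.Dict κ ν) :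
    d.values = d.items.map Prod.snd := rfl

-- ===== VERDICT (by name: the statement is the Claim_ definition above) =====
theorem count_shapes_spec : Claim_equal_count_shapes := by
  intro sd _ hpre
  unfold Spec_count_shapes count_shapes count_shapes_alt
  have hall : ∀ v ∈ ((pvToDict sd).items).map Prod.snd, ((v.get? "shape").isSome : Prop) := by
    intro v hv
    rw [← values_eq_map_snd_items] at hv
    obtain ⟨p, hp, rfl⟩ := values_ofList_sub _ v hv
    obtain ⟨q, hq, hpq⟩ := List.mem_map.mp hp
    have hp2 : p.2 = PySem.Dict.ofList q.2 := by rw [← hpq]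
    unfold Pre_count_shapes at hpre
    simp only [List.all_eq_true] at hpre
    rw [hp2]
    exact get?_ofList_isSome q.2 _ (hpre q hq)
  obtain ⟨codes, hcodes, hloop⟩ := countsLoop_eq (pvToDict sd).items 0 0 0 0 hall
  rw [values_eq_map_snd_items, hcodes, hloop]
  simp
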